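-- pv_equiv track=rewrite | github.com/kankisfun/AIProject | DateAnApp.py | recent_messages
-- ===== SOURCE A (Python) =====
-- from typing import Dict, Any, List, Tuple
--
-- def recent_messages(history: List[Dict[str, str]]) -> List[Dict[str, str]]:
--     user_idx: List[int] = []
--     ai_idx: List[int] = []
--     for i in range(len(history) - 1, -1, -1):
--         role = history[i]["role"]
--         if role == "user" and len(user_idx) < 3:
--             user_idx.append(i)
--         elif role == "assistant" and len(ai_idx) < 3:
--             ai_idx.append(i)
--         if len(user_idx) >= 3 and len(ai_idx) >= 3:
--             break
--     idx = sorted(user_idx + ai_idx)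
--     return [history[i] for i in idx]
-- ===== SOURCE B (Python) =====
-- from typing import Dict, Any, List, Tuple
--
-- def recent_messages(history: List[Dict[str, str]]) -> List[Dict[str, str]]:
--     user_idx = [i for i, m in enumerate(history) if m["role"] == "user"]
--     ai_idx = [i for i, m in enumerate(history) if m["role"] == "assistant"]
--     idx = sorted(user_idx[-3:] + ai_idx[-3:])
--     return [history[i] for i in idx]
-- ===== Notes on version B (the rewrite author's own statement) =====
-- stated objective: simpler
-- what changed: Replaces the backward early-exit scan with capped per-role accumulators by two forward comprehensions collecting all per-role indices, [-3:] slicing and one sort.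
import Mathlib
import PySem

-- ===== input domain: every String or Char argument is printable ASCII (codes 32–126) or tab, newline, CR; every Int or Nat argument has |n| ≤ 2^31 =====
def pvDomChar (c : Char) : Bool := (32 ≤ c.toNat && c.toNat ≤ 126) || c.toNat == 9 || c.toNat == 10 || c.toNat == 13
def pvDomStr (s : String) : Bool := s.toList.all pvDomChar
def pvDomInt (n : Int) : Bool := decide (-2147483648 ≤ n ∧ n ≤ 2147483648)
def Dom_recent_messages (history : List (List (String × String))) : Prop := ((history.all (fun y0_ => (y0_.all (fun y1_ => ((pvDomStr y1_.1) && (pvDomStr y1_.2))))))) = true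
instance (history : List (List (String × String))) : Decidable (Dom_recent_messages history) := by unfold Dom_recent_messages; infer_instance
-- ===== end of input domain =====

-- B replaces A's backward early-exit scan (capped per-role index lists, break once both are
-- full) by two forward full-scan comprehensions plus [-3:] slicing; equally fast, simpler.

-- ===== PORT A =====
-- role of history[i] ('' stands in for the KeyError case, excluded by Pre_)
def pvRoleAt (history : List (List (String × String))) (i : Int) : String :=
  PySem.Dict.getD ⟨PySem.List.pyGetD history i []⟩ "role" ""

-- the backward for-loop with its break, step for step
def pvALoop (history : List (List (String × String))) :
    List Int → List Int × List Int → List Int × List Int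
  | [], st => st
  | i :: rest, (user_idx, ai_idx) =>
    let st' :=
      if pvRoleAt history i = "user" ∧ user_idx.length < 3 then (user_idx ++ [i], ai_idx)
      else if pvRoleAt history i = "assistant" ∧ ai_idx.length < 3 then (user_idx, ai_idx ++ [i])
      else (user_idx, ai_idx)
    if 3 ≤ st'.1.length ∧ 3 ≤ st'.2.length then st'
    else pvALoop history rest st'

def recent_messages (history : List (List (String × String))) : List (List (String × String)) :=
  let st := pvALoop history (PySem.List.pyRange ((history.length : Int) - 1) (-1) (-1)) ([], [])
  let idx := PySem.List.sorted (st.1 ++ st.2) (fun x => x) false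
  idx.map (fun i => PySem.List.pyGetD history i [])

-- ===== PORT B =====
def recent_messages_alt (history : List (List (String × String))) : List (List (String × String)) :=
  let e := PySem.List.enumerate history 0
  let user_idx := (e.filter (fun p => PySem.Dict.getD ⟨p.2⟩ "role" "" == "user")).map (·.1)
  let ai_idx := (e.filter (fun p => PySem.Dict.getD ⟨p.2⟩ "role" "" == "assistant")).map (·.1)
  let idx := PySem.List.sorted
      (PySem.List.slice user_idx (some (-3)) none ++ PySem.List.slice ai_idx (some (-3)) none)
      (fun x => x) false
  idx.map (fun i => PySem.List.pyGetD history i [])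

-- ===== PRECONDITION & SPEC =====
-- Pre_ excludes histories in which some message dict lacks a "role" key: B's forward full scan
-- raises KeyError on every such dict, while A raises only if the backward scan reaches it
-- (its early break can skip malformed leading dicts).
def Pre_recent_messages (history : List (List (String × String))) : Prop :=
  (history.all (fun d => PySem.Dict.contains (⟨d⟩ : PySem.Dict String String) "role")) = true
instance (history : List (List (String × String))) : Decidable (Pre_recent_messages history) := by
  unfold Pre_recent_messages; infer_instance

def pvWitness_recent_messages : (List (List (String × String))) :=
  [[("role", "user"), ("text", "hi")], [("role", "assistant")], [("role", "user")], [("role", "system")]]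

def Spec_recent_messages (history : List (List (String × String))) (out : List (List (String × String))) : Prop := out = recent_messages_alt history
instance (history : List (List (String × String))) (out : List (List (String × String))) : Decidable (Spec_recent_messages history out) := by unfold Spec_recent_messages; infer_instance

-- ===== CLAIM (what is proved, stated in full; the proofs are below) =====
def Claim_equal_recent_messages : Prop := ∀ (history : List (List (String × String))), Dom_recent_messages history → Pre_recent_messages history → Spec_recent_messages history (recent_messages history)

-- ===== LEMMAS AND PROOFS =====

-- the loop body without the break
def pvAStep (history : List (List (String × String))) (st : List Int × List Int) (i : Int) :
    List Int × List Int :=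
  if pvRoleAt history i = "user" ∧ st.1.length < 3 then (st.1 ++ [i], st.2)
  else if pvRoleAt history i = "assistant" ∧ st.2.length < 3 then (st.1, st.2 ++ [i])
  else st

lemma pvAStep_full (history : List (List (String × String))) (st : List Int × List Int) (i : Int)
    (hu : 3 ≤ st.1.length) (ha : 3 ≤ st.2.length) : pvAStep history st i = st := by
  unfold pvAStep
  split_ifs with h1 h2 <;> first | rfl | omega

lemma pvFoldl_full (history : List (List (String × String))) (l : List Int)
    (st : List Int × List Int) (hu : 3 ≤ st.1.length) (ha : 3 ≤ st.2.length) :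
    l.foldl (pvAStep history) st = st := by
  induction l with
  | nil => rfl
  | cons i rest ih => simp [List.foldl, pvAStep_full history st i hu ha, ih]

-- the break never changes the result: once both lists are full every later step is the identity
lemma pvALoop_eq_foldl (history : List (List (String × String))) (l : List Int)
    (st : List Int × List Int) : pvALoop history l st = l.foldl (pvAStep history) st := by
  induction l generalizing st with
  | nil => rfl
  | cons i rest ih =>
    obtain ⟨u, a⟩ := st
    show (let st' := pvAStep history (u, a) i;
          if 3 ≤ st'.1.length ∧ 3 ≤ st'.2.length then st' else pvALoop history rest st') = _
    simp only [List.foldl]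
    split_ifs with hfull
    · exact (pvFoldl_full history rest _ hfull.1 hfull.2).symm
    · exact ih _

-- the fold collects, per role, the first 3 matching indices past the accumulators
lemma pvFoldl_collect (history : List (List (String × String))) (l : List Int)
    (u a : List Int) :
    l.foldl (pvAStep history) (u, a) =
      (u ++ (l.filter (fun i => pvRoleAt history i = "user")).take (3 - u.length),
       a ++ (l.filter (fun i => pvRoleAt history i = "assistant")).take (3 - a.length)) := by
  induction l generalizing u a with
  | nil => simp
  | cons i rest ih =>
    simp only [List.foldl, List.filter_cons]
    by_cases hu : pvRoleAt history i = "user"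
    · have hna : ¬ pvRoleAt history i = "assistant" := by
        rw [hu]; decide
      by_cases hlt : u.length < 3
      · have : pvAStep history (u, a) i = (u ++ [i], a) := by
          unfold pvAStep; simp [hu, hlt]
        rw [this, ih]
        have h3 : 3 - u.length = (3 - (u ++ [i]).length) + 1 := by
          simp [List.length_append]; omega
        simp [hu, h3, List.take_succ_cons, List.append_assoc]
      · have : pvAStep history (u, a) i = (u, a) := by
          unfold pvAStep; simp [hu, hlt]
        rw [this, ih]
        have h0 : 3 - u.length = 0 := by omega
        simp [hu, h0]
    · by_cases ha : pvRoleAt history i = "assistant"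
      · by_cases hlt : a.length < 3
        · have : pvAStep history (u, a) i = (u, a ++ [i]) := by
            unfold pvAStep; simp [ha, hlt]
          rw [this, ih]
          have h3 : 3 - a.length = (3 - (a ++ [i]).length) + 1 := by
            simp [List.length_append]; omega
          simp [ha, h3, List.take_succ_cons, List.append_assoc]
        · have : pvAStep history (u, a) i = (u, a) := by
            unfold pvAStep; simp [ha, hlt]
          rw [this, ih]
          have h0 : 3 - a.length = 0 := by omega
          simp [ha, h0]
      · have : pvAStep history (u, a) i = (u, a) := by
          unfold pvAStep; simp [hu, ha]
        rw [this, ih]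
        simp [hu, ha]

-- B's per-role index lists are forward filters of the index range
lemma pvB_idx (history : List (List (String × String))) (r : String) :
    ((PySem.List.enumerate history 0).filter
        (fun p => PySem.Dict.getD ⟨p.2⟩ "role" "" == r)).map (·.1) =
      (PySem.List.pyRange 0 (history.length : Int) 1).filter
        (fun i => pvRoleAt history i = r) := by
  rw [PySem.List.enumerate_eq_map_pyRange history ([] : List (String × String))]
  rw [List.filter_map, List.map_map]
  simp only [PySem.List.len_eq]
  have hid : ((fun x => x.1) ∘ fun j => ((j : Int), PySem.List.pyGetD history j ([] : List (String × String)))) = id := rfl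
  rw [hid, List.map_id]
  apply List.filter_congr
  intro i _
  simp [Function.comp, pvRoleAt, Bool.beq_eq_decide_eq]

theorem recent_messages_spec : Claim_equal_recent_messages := by
  intro history _ _
  unfold Spec_recent_messages recent_messages recent_messages_alt
  simp only []
  rw [pvALoop_eq_foldl]
  have hrange : PySem.List.pyRange ((history.length : Int) - 1) (-1) (-1) =
      (PySem.List.pyRange 0 (history.length : Int) 1).reverse := by
    rw [PySem.List.pyRange_neg_one_eq_reverse]
    norm_num
  rw [hrange, pvFoldl_collect]
  rw [pvB_idx history "user", pvB_idx history "assistant"]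
  rw [List.filter_reverse, List.filter_reverse]
  set fu := (PySem.List.pyRange 0 (history.length : Int) 1).filter
      (fun i => pvRoleAt history i = "user") with hfu
  set fa := (PySem.List.pyRange 0 (history.length : Int) 1).filter
      (fun i => pvRoleAt history i = "assistant") with hfa
  rw [PySem.List.slice_from_neg_ofNat fu 3 (by omega),
      PySem.List.slice_from_neg_ofNat fa 3 (by omega)]
  simp only [List.nil_append, List.length_nil, Nat.sub_zero]
  rw [List.take_reverse, List.take_reverse]
  congr 1
  apply PySem.List.sorted_eq_sorted_of_perm _ _ _ (fun x y h => h)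
  exact List.Perm.append (List.reverse_perm _) (List.reverse_perm _)
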